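-- pv_equiv track=rewrite | github.com/haileyport/Algorithm | 프로그래머스/lv2/42578. 위장/위장.py | solution
-- ===== SOURCE A (Python) =====
-- def solution(clothes):
--     answer = 1
--     hash = {}
--
--     for c in clothes:
--         if c[1] in hash.keys():
--             hash[c[1]] = hash.get(c[1], 0) + 1
--         else:
--             hash[c[1]] = 1
--
--     for h in hash:
--         answer *= (hash[h] + 1)
--
--     answer -= 1
--
--     return answer
-- ===== SOURCE B (Python) =====
-- def solution(clothes):
--     cats = sorted(c[1] for c in clothes)
--     answer = 1
--     i = 0
--     n = len(cats)
--     while i < n: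
--         j = i + 1
--         while j < n and cats[j] == cats[i]:
--             j += 1
--         answer *= j - i + 1
--         i = j
--     return answer - 1
-- ===== Notes on version B (the rewrite author's own statement) =====
-- stated objective: alternative
-- what changed: Replaces the hash-map category counter with sort-by-category followed by a single run-length scan of the sorted list, multiplying (run length + 1) per run.
import Mathlib
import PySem

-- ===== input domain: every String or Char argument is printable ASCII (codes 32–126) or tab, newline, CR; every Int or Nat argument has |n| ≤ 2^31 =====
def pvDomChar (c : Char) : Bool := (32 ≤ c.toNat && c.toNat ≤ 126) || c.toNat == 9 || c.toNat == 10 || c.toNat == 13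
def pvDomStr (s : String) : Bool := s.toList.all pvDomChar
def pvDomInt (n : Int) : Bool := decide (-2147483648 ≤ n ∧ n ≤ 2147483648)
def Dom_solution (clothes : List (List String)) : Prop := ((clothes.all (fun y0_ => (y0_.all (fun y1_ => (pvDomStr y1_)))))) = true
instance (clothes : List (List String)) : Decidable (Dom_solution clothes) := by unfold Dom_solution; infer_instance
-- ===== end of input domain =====

-- B sorts a copy of the categories and multiplies (run length + 1) over the runs,
-- instead of A's hash-map counting: an alternative (sort-then-group) algorithm.

-- ===== PORT A =====
-- first loop of A: build the count dict (c[1] via pyGet?; none = IndexError, outside Pre_)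
def solutionDictLoop : List (List String) → PySem.Dict String Int → PySem.Dict String Int
  | [], h => h
  | c :: rest, h =>
    match PySem.List.pyGet? c 1 with
    | none => solutionDictLoop rest h
    | some k =>
        solutionDictLoop rest
          (if h.contains k then h.insert k (h.getD k 0 + 1) else h.insert k 1)

def solution (clothes : List (List String)) : Int :=
  let h := solutionDictLoop clothes PySem.Dict.empty
  (h.keys.foldl (fun a k => a * (h.getD k 0 + 1)) 1) - 1

-- ===== PORT B =====
-- the generator (c[1] for c in clothes); none = IndexError, outside Pre_
def solutionAltCats (clothes : List (List String)) : List String :=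
  clothes.foldr
    (fun c acc =>
      match PySem.List.pyGet? c 1 with
      | some k => k :: acc
      | none => acc) []

-- run-length scan of the sorted category list: each run of length r contributes (r + 1)
def runProd : List String → Int
  | [] => 1
  | k :: rest =>
      ((rest.takeWhile (· == k)).length + 2) * runProd (rest.dropWhile (· == k))
termination_by l => l.length
decreasing_by
  simp only [List.length_cons]
  exact Nat.lt_succ_of_le (List.length_dropWhile_le _ _)

def solution_alt (clothes : List (List String)) : Int :=
  runProd (PySem.List.sorted (solutionAltCats clothes) (fun x => x) false) - 1

-- ===== PRECONDITION & SPEC =====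
-- Pre_ excludes exactly the inputs where Python A raises IndexError: an item with fewer than 2 entries.
def Pre_solution (clothes : List (List String)) : Prop := ∀ c ∈ clothes, 2 ≤ c.length
instance (clothes : List (List String)) : Decidable (Pre_solution clothes) := by
  unfold Pre_solution; infer_instance

def pvWitness_solution : List (List String) :=
  [["yellow_hat", "headgear"], ["blue_sunglasses", "eyewear"], ["green_turban", "headgear"]]

def Spec_solution (clothes : List (List String)) (out : Int) : Prop := out = solution_alt clothes
instance (clothes : List (List String)) (out : Int) : Decidable (Spec_solution clothes out) := by
  unfold Spec_solution; infer_instance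

-- ===== CLAIM (what is proved, stated in full; the proofs are below) =====
def Claim_equal_solution : Prop :=
  ∀ (clothes : List (List String)), Dom_solution clothes → Pre_solution clothes →
    Spec_solution clothes (solution clothes)

-- ===== LEMMAS AND PROOFS =====

-- the category of one item, as both ports see it under Pre_
def catOf (c : List String) : String := (PySem.List.pyGet? c 1).getD ""

theorem pyGet?_of_len (c : List String) (h : 2 ≤ c.length) :
    PySem.List.pyGet? c 1 = some (catOf c) := by
  have hg := PySem.List.pyGet?_ofNat c 1 (show 1 < c.length by omega)
  rw [show ((1 : Nat) : Int) = (1 : Int) from rfl] at hg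
  simp [catOf, hg]

theorem altCats_eq_map (clothes : List (List String)) (h : ∀ c ∈ clothes, 2 ≤ c.length) :
    solutionAltCats clothes = clothes.map catOf := by
  induction clothes with
  | nil => rfl
  | cons c rest ih =>
      have hc := pyGet?_of_len c (h c (by simp))
      simp only [solutionAltCats, List.foldr_cons, List.map_cons]
      rw [hc]
      exact congrArg _ (ih (fun d hd => h d (by simp [hd])))

theorem getD_of_not_contains (d : PySem.Dict String Int) (k : String)
    (h : d.contains k = false) : d.getD k 0 = 0 := by
  cases hg : d.get? k with
  | none => simp [PySem.Dict.getD, hg]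
  | some v =>
      have hc := PySem.Dict.contains_eq_isSome_get? d k
      rw [h, hg] at hc
      simp at hc

theorem dictLoop_eq_counter_aux (clothes : List (List String)) (h : ∀ c ∈ clothes, 2 ≤ c.length)
    (d : PySem.Dict String Int) :
    solutionDictLoop clothes d
      = (clothes.map catOf).foldl (fun d x => d.insert x (d.getD x 0 + 1)) d := by
  induction clothes generalizing d with
  | nil => rfl
  | cons c rest ih =>
      have hc := pyGet?_of_len c (h c (by simp))
      simp only [solutionDictLoop, hc, List.map_cons, List.foldl_cons]
      have hbranch :
          (if d.contains (catOf c) then d.insert (catOf c) (d.getD (catOf c) 0 + 1)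
            else d.insert (catOf c) 1)
          = d.insert (catOf c) (d.getD (catOf c) 0 + 1) := by
        by_cases hc : d.contains (catOf c) = true
        · simp [hc]
        · simp only [Bool.not_eq_true] at hc
          rw [getD_of_not_contains d _ hc]
          simp [hc]
      rw [hbranch]
      exact ih (fun e he => h e (by simp [he])) _

-- A's answer as a product over the distinct categories
theorem foldl_mul_eq_prod (f : String → Int) (l : List String) (a : Int) :
    l.foldl (fun a k => a * f k) a = a * (l.map f).prod := by
  induction l generalizing a with
  | nil => simp
  | cons x xs ih => simp [List.foldl_cons, ih, mul_assoc]

theorem nodup_prod_eq_finset (f : String → Int) (l : List String) (hl : l.Nodup) :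
    (l.map f).prod = ∏ k ∈ l.toFinset, f k := by
  rw [List.prod_toFinset f hl]

-- in a ≤-sorted list, after skipping the head's run no copy of the head remains
theorem not_mem_dropWhile (l : List String) (k : String)
    (hp : l.Pairwise (· ≤ ·)) (hk : ∀ x ∈ l, k ≤ x) :
    k ∉ l.dropWhile (· == k) := by
  induction l with
  | nil => simp
  | cons x xs ih =>
      obtain ⟨hx1, hx2⟩ := List.pairwise_cons.mp hp
      by_cases hx : x = k
      · subst hx
        simp only [List.dropWhile_cons, beq_self_eq_true]
        exact ih hx2 (fun y hy => le_trans (hk x (by simp)) (hx1 y hy))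
      · rw [List.dropWhile_cons_of_neg (by simpa using fun e => hx e)]
        intro hmem
        rcases List.mem_cons.mp hmem with h | h
        · exact hx h.symm
        · have hkx : k < x := lt_of_le_of_ne (hk x (by simp)) (fun e => hx e.symm)
          have hxh : x ≤ k := le_trans (hx1 k h) (le_refl k)
          exact absurd hxh (not_le_of_gt hkx)

theorem runProd_sorted (s : List String) (hp : s.Pairwise (· ≤ ·)) :
    runProd s = ∏ k ∈ s.toFinset, ((s.count k : Int) + 1) := by
  induction s using runProd.induct with
  | case1 => simp [runProd]
  | case2 k rest ih =>
      set t := rest.takeWhile (· == k) with ht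
      set d := rest.dropWhile (· == k) with hd
      have hrest : rest = t ++ d := (List.takeWhile_append_dropWhile).symm
      have htk : ∀ x ∈ t, x = k := fun x hx => by
        have := List.mem_takeWhile_imp hx
        simpa using this
      obtain ⟨hk1, hk2⟩ := List.pairwise_cons.mp hp
      have hkd : k ∉ d := not_mem_dropWhile rest k hk2 hk1
      have hdpw : d.Pairwise (· ≤ ·) :=
        hk2.sublist (List.dropWhile_sublist _)
      have hcount_k : (k :: rest).count k = t.length + 1 := by
        rw [hrest]
        simp [List.count_append, List.count_eq_zero.mpr hkd,
          List.count_eq_length.mpr (fun b hb => ((htk b hb).symm : k = b))]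
      have hcount_ne : ∀ j, j ≠ k → (k :: rest).count j = d.count j := by
        intro j hj
        rw [hrest]
        have htj : t.count j = 0 := List.count_eq_zero.mpr (fun hjt => hj (htk j hjt))
        simp [List.count_cons, List.count_append, htj]
        exact fun e => hj e.symm
      have hfin : (k :: rest).toFinset = insert k d.toFinset := by
        ext x
        simp only [List.toFinset_cons, hrest, List.toFinset_append, Finset.mem_insert,
          Finset.mem_union, List.mem_toFinset]
        constructor
        · rintro (h | h | h)
          · exact Or.inl h
          · exact Or.inl (htk x h)
          · exact Or.inr (by simpa using h)
        · rintro (h | h)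
          · exact Or.inl h
          · exact Or.inr (Or.inr (by simpa using h))
      have hknd : k ∉ d.toFinset := by simpa using hkd
      rw [runProd, hfin, Finset.prod_insert hknd]
      have h1 : ((((k :: rest).count k : Int)) + 1) = (t.length : Int) + 2 := by
        rw [hcount_k]; push_cast; ring
      have h2 : ∀ j ∈ d.toFinset, (((k :: rest).count j : Int) + 1) = ((d.count j : Int) + 1) := by
        intro j hjd
        have : j ≠ k := fun e => hknd (e ▸ hjd)
        rw [hcount_ne j this]
      rw [Finset.prod_congr rfl h2, h1, ← ih hdpw]

theorem count_sorted (l : List String) (k : String) :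
    (PySem.List.sorted l (fun x => x) false).count k = l.count k :=
  (PySem.List.sorted_perm l (fun x => x) false).count_eq k

theorem toFinset_sorted (l : List String) :
    (PySem.List.sorted l (fun x => x) false).toFinset = l.toFinset :=
  List.toFinset_eq_of_perm _ _ (PySem.List.sorted_perm l (fun x => x) false)

-- B's answer as the same product
theorem alt_eq_prod (l : List String) :
    runProd (PySem.List.sorted l (fun x => x) false)
      = ∏ k ∈ l.toFinset, ((l.count k : Int) + 1) := by
  rw [runProd_sorted _ (by simpa using PySem.List.sorted_pairwise l (fun x => x)),
    toFinset_sorted]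
  exact Finset.prod_congr rfl (fun j _ => by rw [count_sorted])

theorem ofList_toFinset (l : List String) : (PySem.Set.ofList l).toFinset = l.toFinset := by
  ext x
  simp [List.mem_toFinset, PySem.Set.mem_ofList]

-- ===== VERDICT (by name: the statement is the Claim_ definition above) =====
theorem solution_spec : Claim_equal_solution := by
  intro clothes _ hpre
  unfold Spec_solution solution solution_alt
  rw [altCats_eq_map clothes hpre]
  set cats := clothes.map catOf with hcats
  rw [dictLoop_eq_counter_aux clothes hpre PySem.Dict.empty, ← hcats]
  rw [PySem.Dict.foldl_insert_getD_add_one_eq_counter]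
  simp only [PySem.Dict.keys_counter, PySem.Dict.getD_counter]
  rw [foldl_mul_eq_prod, one_mul,
    nodup_prod_eq_finset _ _ (PySem.Set.nodup_ofList cats), ofList_toFinset,
    alt_eq_prod]
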